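-- pv_equiv track=rewrite | github.com/yhilmare/SC3-Algorithm | src/kmeanslib/KMeansEvaluation.py | scanAllTheListA
-- ===== SOURCE A (Python) =====
-- def getClassifyResult(instName, resultDict):
--     for item in resultDict.items():
--         if instName in item[1]:
--             return item[0]
--
-- def getClassifyTest(instName, testDict):
--     for item in testDict.items():
--         if instName in item[1]:
--             return item[0]
--
-- def scanAllTheListA(lst, resultDict, testDict):
--     result = set()
--     for i in range(0, len(lst)):
--         inst1 = lst[i]
--         for j in range(i + 1, len(lst)):
--             inst2 = lst[j]
--             if getClassifyResult(inst1, resultDict) == getClassifyResult(inst2, resultDict) and getClassifyTest(inst1, testDict) == getClassifyTest(inst2, testDict):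
--                 result.add((inst1, inst2))
--     return result
-- ===== SOURCE B (Python) =====
-- def scanAllTheListA(lst, resultDict, testDict):
--     rmap = {}
--     for cls, names in resultDict.items():
--         for n in names:
--             if n not in rmap:
--                 rmap[n] = cls
--     tmap = {}
--     for cls, names in testDict.items():
--         for n in names:
--             if n not in tmap:
--                 tmap[n] = cls
--     keyed = [(x, (rmap.get(x), tmap.get(x))) for x in lst]
--     result = set()
--     for i in range(len(keyed)):
--         x, k = keyed[i]
--         for y, k2 in keyed[i + 1:]:
--             if k == k2:
--                 result.add((x, y))
--     return result
-- ===== Notes on version B (the rewrite author's own statement) =====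
-- stated objective: faster
-- what changed: B builds instance-to-class maps from both dicts once (first-match via setdefault-style insertion) and precomputes each list element's (result-class, test-class) key, so the pair loop compares keys in O(1) instead of rescanning both dicts for every pair.
import Mathlib
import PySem

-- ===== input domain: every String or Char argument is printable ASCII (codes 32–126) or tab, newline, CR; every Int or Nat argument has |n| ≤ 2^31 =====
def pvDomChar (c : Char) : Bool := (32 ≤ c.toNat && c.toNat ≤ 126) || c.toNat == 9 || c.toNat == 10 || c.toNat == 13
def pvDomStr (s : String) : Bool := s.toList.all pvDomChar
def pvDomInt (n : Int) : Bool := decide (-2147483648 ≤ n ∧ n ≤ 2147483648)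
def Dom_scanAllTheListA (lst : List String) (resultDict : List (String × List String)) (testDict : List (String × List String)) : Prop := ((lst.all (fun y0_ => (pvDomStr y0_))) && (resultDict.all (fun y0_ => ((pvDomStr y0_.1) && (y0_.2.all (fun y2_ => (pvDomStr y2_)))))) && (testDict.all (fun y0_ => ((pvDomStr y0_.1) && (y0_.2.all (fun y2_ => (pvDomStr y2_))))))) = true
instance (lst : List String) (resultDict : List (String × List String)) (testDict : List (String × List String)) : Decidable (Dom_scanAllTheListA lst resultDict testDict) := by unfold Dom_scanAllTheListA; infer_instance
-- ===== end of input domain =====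

-- B precomputes first-match instance→class dictionaries and per-element keys once, turning A's
-- O(n^2·D) repeated dict scans into an O(D + n^2) pair loop (objective: faster).

-- ===== PORT A =====
-- first dict key whose value list contains instName (None if no match)
def getClassifyResult (instName : String) (resultDict : List (String × List String)) : Option String :=
  match resultDict with
  | [] => none
  | item :: rest => if item.2.contains instName then some item.1 else getClassifyResult instName rest

def getClassifyTest (instName : String) (testDict : List (String × List String)) : Option String :=
  match testDict with
  | [] => none
  | item :: rest => if item.2.contains instName then some item.1 else getClassifyTest instName rest

-- inner loop over the elements after inst1
def scanInnerA (resultDict testDict : List (String × List String)) (inst1 : String)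
    (rest : List String) (res : PySem.Set (String × String)) : PySem.Set (String × String) :=
  rest.foldl (fun res inst2 =>
    if (getClassifyResult inst1 resultDict == getClassifyResult inst2 resultDict
        && getClassifyTest inst1 testDict == getClassifyTest inst2 testDict)
    then PySem.Set.add res (inst1, inst2) else res) res

-- outer loop: i over the list, pairing lst[i] with every later element
def scanOuterA (resultDict testDict : List (String × List String)) :
    List String → PySem.Set (String × String) → PySem.Set (String × String)
  | [], res => res
  | inst1 :: rest, res => scanOuterA resultDict testDict rest (scanInnerA resultDict testDict inst1 rest res)

def scanAllTheListA (lst : List String) (resultDict : List (String × List String)) (testDict : List (String × List String)) : List (String × String) :=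
  scanOuterA resultDict testDict lst PySem.Set.empty

-- ===== PORT B =====
-- setdefault-style insertion: keep the first class seen for each name
def addNamesB (cls : String) (m : PySem.Dict String String) (names : List String) : PySem.Dict String String :=
  names.foldl (fun m n => if m.contains n then m else m.insert n cls) m

def buildMapB (d : List (String × List String)) : PySem.Dict String String :=
  d.foldl (fun m kv => addNamesB kv.1 m kv.2) PySem.Dict.empty

-- pair loop over the precomputed (element, key) list
def pairOuterB : List (String × (Option String × Option String)) →
    PySem.Set (String × String) → PySem.Set (String × String)
  | [], res => res
  | (x, k) :: rest, res =>
      pairOuterB rest (rest.foldl (fun res yk => if k == yk.2 then PySem.Set.add res (x, yk.1) else res) res)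

def scanAllTheListA_alt (lst : List String) (resultDict : List (String × List String)) (testDict : List (String × List String)) : List (String × String) :=
  let rmap := buildMapB resultDict
  let tmap := buildMapB testDict
  let keyed := lst.map (fun x => (x, (rmap.get? x, tmap.get? x)))
  pairOuterB keyed PySem.Set.empty

-- ===== PRECONDITION & SPEC =====
def Spec_scanAllTheListA (lst : List String) (resultDict : List (String × List String)) (testDict : List (String × List String)) (out : List (String × String)) : Prop := out = scanAllTheListA_alt lst resultDict testDict
instance (lst : List String) (resultDict : List (String × List String)) (testDict : List (String × List String)) (out : List (String × String)) : Decidable (Spec_scanAllTheListA lst resultDict testDict out) := by unfold Spec_scanAllTheListA; infer_instance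

-- ===== CLAIM (what is proved, stated in full; the proofs are below) =====
def Claim_equal_scanAllTheListA : Prop := ∀ (lst : List String) (resultDict : List (String × List String)) (testDict : List (String × List String)), Dom_scanAllTheListA lst resultDict testDict → Spec_scanAllTheListA lst resultDict testDict (scanAllTheListA lst resultDict testDict)

-- ===== LEMMAS AND PROOFS =====

-- lookup after a setdefault fold over one value list
theorem get?_addNamesB (cls : String) (names : List String) (m : PySem.Dict String String) (n : String) :
    (addNamesB cls m names).get? n =
      Option.or (m.get? n) (if names.contains n then some cls else none) := by
  induction names generalizing m with
  | nil => simp [addNamesB]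
  | cons h t ih =>
    simp only [addNamesB, List.foldl_cons] at *
    by_cases hc : m.contains h = true
    · rw [if_pos hc, ih]
      by_cases hn : h = n
      · subst hn
        cases hg : m.get? h with
        | some v => simp
        | none =>
          have : (m.get? h).isSome = true := by
            rw [← PySem.Dict.contains_eq_isSome_get?]; exact hc
          rw [hg] at this; cases this
      · have hn' : ¬ n = h := fun e => hn e.symm
        simp [hn']
    · rw [if_neg hc, ih, PySem.Dict.get?_insert]
      by_cases hn : n = h
      · subst hn
        have hnone : m.get? n = none := by
          cases hg : m.get? n with
          | none => rfl
          | some v =>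
            exact absurd (by rw [PySem.Dict.contains_eq_isSome_get?, hg]; rfl) hc
        simp [hnone]
      · simp [hn]

-- lookup in the fold-built map = the first matching dict item (A's helper)
theorem get?_buildMapB_aux (d : List (String × List String)) (m : PySem.Dict String String) (n : String) :
    (d.foldl (fun m kv => addNamesB kv.1 m kv.2) m).get? n =
      Option.or (m.get? n) (getClassifyResult n d) := by
  induction d generalizing m with
  | nil => simp [getClassifyResult]
  | cons kv rest ih =>
    simp only [List.foldl_cons, ih, get?_addNamesB, getClassifyResult]
    cases hg : m.get? n <;> by_cases h2 : n ∈ kv.2 <;> simp [h2]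

theorem get?_buildMapB (d : List (String × List String)) (n : String) :
    (buildMapB d).get? n = getClassifyResult n d := by
  simpa [buildMapB] using get?_buildMapB_aux d PySem.Dict.empty n

theorem getClassifyTest_eq (n : String) (d : List (String × List String)) :
    getClassifyTest n d = getClassifyResult n d := by
  induction d with
  | nil => rfl
  | cons kv rest ih => simp [getClassifyTest, getClassifyResult, ih]

-- the two loops agree when B's keys are A's classify values
theorem scanOuterA_eq_pairOuterB (resultDict testDict : List (String × List String))
    (lst : List String) (res : PySem.Set (String × String)) :
    scanOuterA resultDict testDict lst res =
      pairOuterB (lst.map (fun x => (x, (getClassifyResult x resultDict, getClassifyResult x testDict)))) res := by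
  induction lst generalizing res with
  | nil => rfl
  | cons x rest ih =>
    simp only [List.map_cons, scanOuterA, pairOuterB, ih]
    congr 1
    simp only [scanInnerA, List.foldl_map]
    apply PySem.List.foldl_congr_mem
    intro acc y _
    have hb : ((getClassifyResult x resultDict, getClassifyResult x testDict)
              == (getClassifyResult y resultDict, getClassifyResult y testDict))
        = (getClassifyResult x resultDict == getClassifyResult y resultDict
            && getClassifyTest x testDict == getClassifyTest y testDict) := by
      rw [getClassifyTest_eq, getClassifyTest_eq]; rfl
    rw [hb]

-- ===== VERDICT (by name: the statement is the Claim_ definition above) =====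
theorem scanAllTheListA_spec : Claim_equal_scanAllTheListA := by
  intro lst resultDict testDict _
  unfold Spec_scanAllTheListA scanAllTheListA scanAllTheListA_alt
  simp only [get?_buildMapB]
  exact scanOuterA_eq_pairOuterB resultDict testDict lst PySem.Set.empty
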